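-- pv_equiv track=rewrite | github.com/LindgeW/MetaAug4NER | utils/tag_util.py | extract_cws_bies_span
-- ===== SOURCE A (Python) =====
-- def extract_cws_bies_span(tag_seq):
--     spans = []
--     s = 0
--     start = False
--     for i, tag in enumerate(tag_seq):
--         if tag == 'S':
--             spans.append((i, i))
--             start = False
--         elif tag == 'B':
--             s = i
--             start = True
--         elif tag == 'E':
--             if start:
--                 spans.append((s, i))
--                 start = False
--         else:
--             if tag not in ['I', 'M']:
--                 start = False
--     return spans
-- ===== SOURCE B (Python) =====
-- def _scan_end(tags, j):
--     while j < len(tags) and tags[j] in ('I', 'M'):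
--         j += 1
--     if j < len(tags) and tags[j] == 'E':
--         return j
--     return None
--
-- def extract_cws_bies_span(tag_seq):
--     spans = []
--     for i, tag in enumerate(tag_seq):
--         if tag == 'S':
--             spans.append((i, i))
--         elif tag == 'B':
--             j = _scan_end(tag_seq, i + 1)
--             if j is not None:
--                 spans.append((i, j))
--     return spans
-- ===== Notes on version B (the rewrite author's own statement) =====
-- stated objective: alternative
-- what changed: Replaced A's single stateful pass (pending-start flag and saved start index) with a stateless per-'B' nested forward scan over I/M tags for the matching 'E'.
import Mathlib
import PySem

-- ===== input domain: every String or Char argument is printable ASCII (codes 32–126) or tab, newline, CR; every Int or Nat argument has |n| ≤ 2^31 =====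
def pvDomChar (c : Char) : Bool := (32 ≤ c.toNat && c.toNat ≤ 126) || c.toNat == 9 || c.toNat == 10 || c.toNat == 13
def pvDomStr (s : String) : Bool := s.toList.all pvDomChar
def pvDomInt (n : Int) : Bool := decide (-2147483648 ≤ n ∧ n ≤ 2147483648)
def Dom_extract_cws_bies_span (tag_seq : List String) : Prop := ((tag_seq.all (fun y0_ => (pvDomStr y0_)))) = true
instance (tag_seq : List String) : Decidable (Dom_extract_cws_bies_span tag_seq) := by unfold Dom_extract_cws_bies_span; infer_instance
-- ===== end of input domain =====

-- B replaces A's single stateful pass (flag + saved start index) with a stateless per-'B' forward scan for the matching 'E'; same output, alternative algorithm.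
-- ===== PORT A =====
def goA_extract : Int → List String → List (Int × Int) → Int → Bool → List (Int × Int)
  | _, [], spans, _, _ => spans
  | i, tag :: rest, spans, s, start =>
    if tag = "S" then goA_extract (i+1) rest (spans ++ [(i, i)]) s false
    else if tag = "B" then goA_extract (i+1) rest spans i true
    else if tag = "E" then
      if start then goA_extract (i+1) rest (spans ++ [(s, i)]) s false
      else goA_extract (i+1) rest spans s start
    else if tag = "I" ∨ tag = "M" then goA_extract (i+1) rest spans s start
    else goA_extract (i+1) rest spans s false

def extract_cws_bies_span (tag_seq : List String) : List (Int × Int) :=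
  goA_extract 0 tag_seq [] 0 false

-- ===== PORT B =====
-- _scan_end: advance over 'I'/'M' tags; return the index of a terminating 'E', else none
def scanEnd_extract : List String → Int → Option Int
  | [], _ => none
  | tag :: rest, j =>
    if tag = "I" ∨ tag = "M" then scanEnd_extract rest (j+1)
    else if tag = "E" then some j
    else none

def goB_extract : Int → List String → List (Int × Int)
  | _, [] => []
  | i, tag :: rest =>
    if tag = "S" then (i, i) :: goB_extract (i+1) rest
    else if tag = "B" then
      match scanEnd_extract rest (i+1) with
      | some j => (i, j) :: goB_extract (i+1) rest
      | none => goB_extract (i+1) rest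
    else goB_extract (i+1) rest

def extract_cws_bies_span_alt (tag_seq : List String) : List (Int × Int) :=
  goB_extract 0 tag_seq

-- ===== PRECONDITION & SPEC =====
def Spec_extract_cws_bies_span (tag_seq : List String) (out : List (Int × Int)) : Prop := out = extract_cws_bies_span_alt tag_seq
instance (tag_seq : List String) (out : List (Int × Int)) : Decidable (Spec_extract_cws_bies_span tag_seq out) := by unfold Spec_extract_cws_bies_span; infer_instance

-- ===== CLAIM (what is proved, stated in full; the proofs are below) =====
def Claim_equal_extract_cws_bies_span : Prop := ∀ (tag_seq : List String), Dom_extract_cws_bies_span tag_seq → Spec_extract_cws_bies_span tag_seq (extract_cws_bies_span tag_seq)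

-- ===== LEMMAS AND PROOFS =====
-- Main invariant: A's stateful fold equals B's nested-scan result, for both flag states.
theorem goA_goB (ts : List String) : ∀ (i : Int) (spans : List (Int × Int)) (s : Int),
    goA_extract i ts spans s false = spans ++ goB_extract i ts ∧
    goA_extract i ts spans s true = spans ++ (match scanEnd_extract ts i with
      | some j => (s, j) :: goB_extract i ts
      | none => goB_extract i ts) := by
  induction ts with
  | nil => intro i spans s; simp [goA_extract, goB_extract, scanEnd_extract]
  | cons tag rest ih =>
    intro i spans s
    by_cases hS : tag = "S"
    · subst hS
      simp only [goA_extract, goB_extract, scanEnd_extract]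
      norm_num
      constructor
      · rw [(ih (i+1) (spans ++ [(i,i)]) s).1]; simp
      · rw [(ih (i+1) (spans ++ [(i,i)]) s).1]; simp
    · by_cases hB : tag = "B"
      · subst hB
        simp only [goA_extract, goB_extract, scanEnd_extract]
        norm_num
        constructor
        · rw [(ih (i+1) spans i).2]
          cases h : scanEnd_extract rest (i+1) <;> simp
        · rw [(ih (i+1) spans i).2]
          cases h : scanEnd_extract rest (i+1) <;> simp
      · by_cases hE : tag = "E"
        · subst hE
          simp only [goA_extract, goB_extract, scanEnd_extract]
          norm_num
          constructor
          · exact (ih (i+1) spans s).1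
          · rw [(ih (i+1) (spans ++ [(s,i)]) s).1]; simp
        · by_cases hIM : tag = "I" ∨ tag = "M"
          · simp only [goA_extract, goB_extract, scanEnd_extract, if_neg hS, if_neg hB,
              if_neg hE, if_pos hIM]
            exact ⟨(ih (i+1) spans s).1, (ih (i+1) spans s).2⟩
          · simp only [goA_extract, goB_extract, scanEnd_extract, if_neg hS, if_neg hB,
              if_neg hE, if_neg hIM]
            exact ⟨(ih (i+1) spans s).1, (ih (i+1) spans s).1⟩

-- ===== VERDICT (by name: the statement is the Claim_ definition above) =====
theorem extract_cws_bies_span_spec : Claim_equal_extract_cws_bies_span := by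
  intro ts _
  show extract_cws_bies_span ts = extract_cws_bies_span_alt ts
  have := (goA_goB ts 0 [] 0).1
  simpa [extract_cws_bies_span, extract_cws_bies_span_alt] using this
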